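-- pv_equiv track=rewrite | github.com/paihanhuang/debug-agent | ckg-augment/ckg_augment/cli.py | _extract_human_report_only
-- ===== SOURCE A (Python) =====
-- def _extract_human_report_only(raw: str) -> str:
--     """If raw is a combined data/<case> file, return only the human report portion."""
--     lines = (raw or "").splitlines()
--     marker = None
--     for i, l in enumerate(lines):
--         if "E2E Test Query" in l:
--             marker = i
--             break
--     if marker is None:
--         return raw.strip()
--
--     report_end = marker
--     for j in range(marker - 1, -1, -1):
--         if lines[j].strip() == "---":
--             report_end = j
--             break
--     return "\n".join(lines[:report_end]).strip()
-- ===== SOURCE B (Python) =====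
-- def _extract_human_report_only(raw: str) -> str:
--     """If raw is a combined data/<case> file, return only the human report portion."""
--     lines = (raw or "").splitlines()
--     last_sep = None
--     for i, l in enumerate(lines):
--         if "E2E Test Query" in l:
--             report_end = last_sep if last_sep is not None else i
--             return "\n".join(lines[:report_end]).strip()
--         if l.strip() == "---":
--             last_sep = i
--     return raw.strip()
-- ===== Notes on version B (the rewrite author's own statement) =====
-- stated objective: simpler
-- what changed: Replaces A's two scans (forward to find the marker, then backward from it for the last '---') with one forward pass that carries the last-separator index and returns as soon as the marker line is seen.
import Mathlib
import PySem

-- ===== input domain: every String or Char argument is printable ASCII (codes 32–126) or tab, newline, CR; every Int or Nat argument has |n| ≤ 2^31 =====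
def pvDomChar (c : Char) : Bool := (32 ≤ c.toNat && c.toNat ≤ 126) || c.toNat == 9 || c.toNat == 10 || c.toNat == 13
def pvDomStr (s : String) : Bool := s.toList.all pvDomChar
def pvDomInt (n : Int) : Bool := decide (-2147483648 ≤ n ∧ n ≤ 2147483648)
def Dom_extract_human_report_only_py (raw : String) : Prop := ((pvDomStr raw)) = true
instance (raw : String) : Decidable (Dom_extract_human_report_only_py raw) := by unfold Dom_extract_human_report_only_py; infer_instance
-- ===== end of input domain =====

-- B replaces A's forward-then-backward two-scan structure with a single forward pass
-- carrying the index of the last '---' separator seen so far (objective: simpler).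

-- ===== PORT A =====
-- first loop of A: first index i with "E2E Test Query" in lines[i]
def pvFindMarker (needle : String) : List String → Nat → Option Nat
  | [], _ => none
  | l :: rest, i =>
    if PySem.Str.isIn needle l then some i else pvFindMarker needle rest (i + 1)

-- second loop of A: for j in range(marker-1, -1, -1): break on lines[j].strip() == "---";
-- the Nat argument counts the indices still to visit (current index = arg - 1), fallback = marker
def pvBackScan (lines : List String) (marker : Nat) : Nat → Nat
  | 0 => marker
  | j + 1 =>
    if PySem.Str.strip (lines.getD j "") = "---" then j
    else pvBackScan lines marker j

def extract_human_report_only_py (raw : String) : String :=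
  -- '(raw or "")' is 'raw' itself for every string argument
  let lines := PySem.Str.splitlines raw
  match pvFindMarker "E2E Test Query" lines 0 with
  | none => PySem.Str.strip raw
  | some marker =>
      PySem.Str.strip (PySem.Str.join "\n" (lines.take (pvBackScan lines marker marker)))

-- ===== PORT B =====
-- single forward pass: lastSep = index of last line so far whose strip is "---"
def pvFwdGo (lines : List String) (raw : String) : List String → Nat → Option Nat → String
  | [], _, _ => PySem.Str.strip raw
  | l :: rest, i, lastSep =>
    if PySem.Str.isIn "E2E Test Query" l then
      PySem.Str.strip (PySem.Str.join "\n" (lines.take (lastSep.getD i)))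
    else if PySem.Str.strip l = "---" then pvFwdGo lines raw rest (i + 1) (some i)
    else pvFwdGo lines raw rest (i + 1) lastSep

def extract_human_report_only_py_alt (raw : String) : String :=
  let lines := PySem.Str.splitlines raw
  pvFwdGo lines raw lines 0 none

-- ===== PRECONDITION & SPEC =====
def Spec_extract_human_report_only_py (raw : String) (out : String) : Prop := out = extract_human_report_only_py_alt raw
instance (raw : String) (out : String) : Decidable (Spec_extract_human_report_only_py raw out) := by unfold Spec_extract_human_report_only_py; infer_instance

-- ===== CLAIM (what is proved, stated in full; the proofs are below) =====
def Claim_equal_extract_human_report_only_py : Prop := ∀ (raw : String), Dom_extract_human_report_only_py raw → Spec_extract_human_report_only_py raw (extract_human_report_only_py raw)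

-- ===== LEMMAS AND PROOFS =====

-- forward reading of B's carried state: last index j < i with lines[j].strip() == "---"
def pvLastSep (lines : List String) : Nat → Option Nat
  | 0 => none
  | i + 1 =>
    if PySem.Str.strip (lines.getD i "") = "---" then some i else pvLastSep lines i

theorem pvBackScan_eq_lastSep (lines : List String) (m : Nat) :
    ∀ i, pvBackScan lines m i = (pvLastSep lines i).getD m := by
  intro i
  induction i with
  | zero => rfl
  | succ j ih =>
      simp only [pvBackScan, pvLastSep]
      split <;> simp [ih]

theorem pvFwdGo_eq (lines : List String) (raw : String) :
    ∀ rest i lastSep, rest = lines.drop i → lastSep = pvLastSep lines i →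
      pvFwdGo lines raw rest i lastSep =
        match pvFindMarker "E2E Test Query" rest i with
        | none => PySem.Str.strip raw
        | some m =>
            PySem.Str.strip (PySem.Str.join "\n" (lines.take (pvBackScan lines m m))) := by
  intro rest
  induction rest with
  | nil => intro i lastSep _ _; simp [pvFwdGo, pvFindMarker]
  | cons l rest' ih =>
      intro i lastSep hdrop hsep
      have hi : i < lines.length := by
        by_contra h
        simp [List.drop_eq_nil_of_le (Nat.le_of_not_lt h)] at hdrop
      have hcd := List.getElem_cons_drop (as := lines) (h := hi)
      rw [← hdrop] at hcd
      have hl : lines[i]? = some l := by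
        rw [List.getElem?_eq_getElem hi]
        refine congrArg some ?_; injection hcd.symm with h1 h2; exact h1.symm
      have hdrop' : rest' = lines.drop (i + 1) := by injection hcd.symm
      simp only [pvFwdGo, pvFindMarker]
      split
      · -- marker found at i
        simp [pvBackScan_eq_lastSep, hsep]
      · split
        · -- separator line
          rename_i hnot hstrip
          rw [ih (i + 1) (some i) hdrop' ?_]
          simp [pvLastSep, List.getD, hl, hstrip]
        · rename_i hnot hnstrip
          rw [ih (i + 1) lastSep hdrop' ?_]
          simp [pvLastSep, List.getD, hl, hnstrip, hsep]

-- ===== VERDICT (by name: the statement is the Claim_ definition above) =====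
theorem extract_human_report_only_py_spec : Claim_equal_extract_human_report_only_py := by
  intro raw _
  unfold Spec_extract_human_report_only_py extract_human_report_only_py extract_human_report_only_py_alt
  exact (pvFwdGo_eq (PySem.Str.splitlines raw) raw (PySem.Str.splitlines raw) 0 none rfl rfl).symm
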